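-- pv_equiv track=rewrite | github.com/shashankmishraa/BHIV-HR-Platform | services/gateway/app/shared/security.py | validate_sql_input
-- ===== SOURCE A (Python) =====
-- def validate_sql_input(input_str: str) -> bool:
--     """Validate input for SQL injection patterns"""
--     if not input_str:
--         return True
--
--     # Common SQL injection patterns
--     sql_patterns = [
--         'union', 'select', 'insert', 'update', 'delete', 'drop',
--         'create', 'alter', 'exec', 'execute', '--', '/*', '*/',
--         'xp_', 'sp_', 'waitfor', 'delay'
--     ]
--
--     input_lower = input_str.lower()
--     for pattern in sql_patterns:
--         if pattern in input_lower:
--             return False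
--
--     return True
-- ===== SOURCE B (Python) =====
-- _SQL_PATTERNS = (
--     'union', 'select', 'insert', 'update', 'delete', 'drop',
--     'create', 'alter', 'exec', 'execute', '--', '/*', '*/',
--     'xp_', 'sp_', 'waitfor', 'delay'
-- )
--
-- def validate_sql_input(input_str: str) -> bool:
--     if not input_str:
--         return True
--     s = input_str.lower()
--     # single left-to-right pass over positions: at each index, does any pattern start here?
--     return all(not s.startswith(p, i) for i in range(len(s)) for p in _SQL_PATTERNS)
-- ===== Notes on version B (the rewrite author's own statement) =====
-- stated objective: alternative
-- what changed: Replaces A's pattern-major loop of 17 separate substring scans with a single position-major pass over the lowered string that tests each index for a pattern starting there.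
import Mathlib
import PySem

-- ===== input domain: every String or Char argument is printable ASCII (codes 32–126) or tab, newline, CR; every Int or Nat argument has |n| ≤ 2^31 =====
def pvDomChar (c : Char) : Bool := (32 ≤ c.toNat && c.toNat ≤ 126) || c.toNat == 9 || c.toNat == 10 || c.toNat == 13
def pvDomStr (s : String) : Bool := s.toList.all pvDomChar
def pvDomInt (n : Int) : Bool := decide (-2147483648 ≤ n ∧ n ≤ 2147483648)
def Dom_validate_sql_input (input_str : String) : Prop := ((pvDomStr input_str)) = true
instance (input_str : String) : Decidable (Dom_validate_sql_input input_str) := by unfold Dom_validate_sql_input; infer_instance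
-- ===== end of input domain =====

-- B replaces A's pattern-major loop of 17 substring scans with one position-major pass
-- over the lowered string (objective: alternative; same asymptotic cost).

-- ===== PORT A =====
def sqlPatternsA : List String :=
  ["union", "select", "insert", "update", "delete", "drop",
   "create", "alter", "exec", "execute", "--", "/*", "*/",
   "xp_", "sp_", "waitfor", "delay"]

def aLoop : List String → String → Bool
  | [], _ => true
  | p :: rest, s => if PySem.Str.isIn p s then false else aLoop rest s

def validate_sql_input (input_str : String) : Bool :=
  if PySem.Str.len input_str == 0 then true
  else aLoop sqlPatternsA (PySem.Str.lower input_str)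

-- ===== PORT B =====
def sqlPatternsB : List (List Char) :=
  ["union".toList, "select".toList, "insert".toList, "update".toList, "delete".toList,
   "drop".toList, "create".toList, "alter".toList, "exec".toList, "execute".toList,
   "--".toList, "/*".toList, "*/".toList, "xp_".toList, "sp_".toList,
   "waitfor".toList, "delay".toList]

def validate_sql_input_alt (input_str : String) : Bool :=
  if PySem.Str.len input_str == 0 then true
  else
    let s := PySem.Chars.lower input_str.toList
    -- s.startswith(p, i) for 0 ≤ i < len(s) is a prefix test on s.drop i
    (List.range s.length).all fun i =>
      sqlPatternsB.all fun p => !PySem.Chars.startswith (s.drop i) p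

-- ===== PRECONDITION & SPEC =====
def Spec_validate_sql_input (input_str : String) (out : Bool) : Prop := out = validate_sql_input_alt input_str
instance (input_str : String) (out : Bool) : Decidable (Spec_validate_sql_input input_str out) := by unfold Spec_validate_sql_input; infer_instance

-- ===== CLAIM (what is proved, stated in full; the proofs are below) =====
def Claim_equal_validate_sql_input : Prop := ∀ (input_str : String), Dom_validate_sql_input input_str → Spec_validate_sql_input input_str (validate_sql_input input_str)

-- ===== LEMMAS AND PROOFS =====

lemma aLoop_eq_all (pats : List String) (s : String) :
    aLoop pats s = pats.all (fun p => !PySem.Str.isIn p s) := by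
  induction pats with
  | nil => rfl
  | cons p rest ih =>
      simp only [aLoop, List.all_cons, ih]
      cases h : PySem.Str.isIn p s
      · simp [h]
      · simp [h]

lemma scan_eq_all (pats : List (List Char)) (h : ∀ p ∈ pats, p ≠ []) (l : List Char) :
    ((List.range l.length).all fun i =>
        pats.all fun p => !PySem.Chars.startswith (l.drop i) p)
      = pats.all (fun p => !PySem.Chars.isIn p l) := by
  rw [Bool.eq_iff_iff]
  simp only [List.all_eq_true, List.mem_range, Bool.not_eq_true']
  constructor
  · intro H p hp
    rw [PySem.Chars.isIn_eq_false_iff]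
    intro hinf
    obtain ⟨j, hj⟩ := (PySem.Chars.exists_prefix_drop_iff_isIn p l).2
      ((PySem.Chars.isIn_iff_infix p l).2 hinf)
    by_cases hjl : j < l.length
    · have hsf := H j hjl p hp
      rw [(PySem.Chars.startswith_iff _ _).mpr hj] at hsf
      exact absurd hsf (by simp)
    · have hnil : l.drop j = [] := List.drop_eq_nil_of_le (le_of_not_gt hjl)
      rw [hnil] at hj
      exact h p hp (List.prefix_nil.mp hj)
  · intro H i _ p hp
    cases hsw : PySem.Chars.startswith (l.drop i) p with
    | false => rfl
    | true =>
      exfalso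
      have hpre := (PySem.Chars.startswith_iff _ _).mp hsw
      have hin : PySem.Chars.isIn p l = true :=
        (PySem.Chars.exists_prefix_drop_iff_isIn p l).1 ⟨i, hpre⟩
      rw [H p hp] at hin
      exact Bool.false_ne_true hin

lemma pats_map : sqlPatternsA.map String.toList = sqlPatternsB := by decide

lemma pats_nonempty : ∀ p ∈ sqlPatternsB, p ≠ [] := by decide

-- ===== VERDICT (by name: the statement is the Claim_ definition above) =====
theorem validate_sql_input_spec : Claim_equal_validate_sql_input := by
  intro s _
  show validate_sql_input s = validate_sql_input_alt s
  unfold validate_sql_input validate_sql_input_alt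
  by_cases h : (PySem.Str.len s == 0) = true
  · rw [if_pos h, if_pos h]
  · rw [if_neg h, if_neg h]
    rw [aLoop_eq_all, scan_eq_all sqlPatternsB pats_nonempty]
    rw [← pats_map, List.all_map]
    simp [Function.comp_def]
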